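-- pv_equiv track=rewrite | github.com/Naythan-Ed/Python-trabajo | suma.py | calcular_suma_y_secuencia
-- ===== SOURCE A (Python) =====
-- def calcular_suma_y_secuencia(n):
--     """Calcula la suma de los primeros n números y genera la secuencia."""
--     suma_total = 0
--     secuencia_str = ""
--
--     # Estructura de control (Ciclo)
--     for i in range(1, n + 1):
--         suma_total += i
--         if i == n:
--             secuencia_str += str(i)
--         else:
--             secuencia_str += f"{i} + "
--
--     return suma_total, secuencia_str
-- ===== SOURCE B (Python) =====
-- def calcular_suma_y_secuencia(n):
--     """Calcula la suma de los primeros n números y genera la secuencia."""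
--     secuencia = " + ".join(str(i) for i in range(1, n + 1))
--     suma = n * (n + 1) // 2 if n > 0 else 0
--     return suma, secuencia
-- ===== Notes on version B (the rewrite author's own statement) =====
-- stated objective: simpler
-- what changed: Replaces the accumulating loop by the closed-form triangular-number sum and a ' + '.join over the same range, removing the loop and its last-element branch.
import Mathlib
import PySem

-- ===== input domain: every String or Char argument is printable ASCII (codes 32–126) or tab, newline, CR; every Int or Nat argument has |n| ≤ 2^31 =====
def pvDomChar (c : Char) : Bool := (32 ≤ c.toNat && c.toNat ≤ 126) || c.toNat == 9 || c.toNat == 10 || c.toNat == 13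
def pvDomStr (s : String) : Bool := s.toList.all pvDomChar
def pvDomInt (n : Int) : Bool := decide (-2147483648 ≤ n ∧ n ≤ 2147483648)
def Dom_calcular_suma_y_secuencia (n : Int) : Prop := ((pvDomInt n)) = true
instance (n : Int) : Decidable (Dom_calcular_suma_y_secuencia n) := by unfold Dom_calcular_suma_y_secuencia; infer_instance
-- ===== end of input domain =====

-- B replaces A's accumulating loop by the closed-form sum n*(n+1)//2 and a " + ".join
-- over range(1, n+1): simpler, no loop and no last-element branch.

-- ===== PORT A =====
-- Loop over range(1, n+1) carrying (suma_total, secuencia_str); strings kept as List Char.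
def calcular_suma_y_secuencia (n : Int) : Int × String :=
  let st := (PySem.List.pyRange 1 (n + 1) 1).foldl
    (fun (st : Int × List Char) i =>
      (st.1 + i,
       if i = n then st.2 ++ PySem.Int.toChars i
       else st.2 ++ PySem.Int.toChars i ++ [' ', '+', ' ']))
    (0, ([] : List Char))
  (st.1, String.ofList st.2)

-- ===== PORT B =====
def calcular_suma_y_secuencia_alt (n : Int) : Int × String :=
  let secuencia := PySem.Chars.join [' ', '+', ' ']
    ((PySem.List.pyRange 1 (n + 1) 1).map PySem.Int.toChars)
  let suma := if 0 < n then PySem.Int.floordiv (n * (n + 1)) 2 else 0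
  (suma, String.ofList secuencia)

-- ===== PRECONDITION & SPEC =====
def Spec_calcular_suma_y_secuencia (n : Int) (out : Int × String) : Prop := out = calcular_suma_y_secuencia_alt n
instance (n : Int) (out : Int × String) : Decidable (Spec_calcular_suma_y_secuencia n out) := by unfold Spec_calcular_suma_y_secuencia; infer_instance

-- ===== CLAIM (what is proved, stated in full; the proofs are below) =====
def Claim_equal_calcular_suma_y_secuencia : Prop := ∀ (n : Int), Dom_calcular_suma_y_secuencia n → Spec_calcular_suma_y_secuencia n (calcular_suma_y_secuencia n)

-- ===== LEMMAS AND PROOFS =====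

-- A's loop body, named for the lemmas.
def pvStepA (n : Int) (st : Int × List Char) (i : Int) : Int × List Char :=
  (st.1 + i,
   if i = n then st.2 ++ PySem.Int.toChars i
   else st.2 ++ PySem.Int.toChars i ++ [' ', '+', ' '])

-- On a list of elements all ≠ n, A's fold takes the else branch throughout.
lemma pvFoldA_ne (n : Int) (l : List Int) (h : ∀ i ∈ l, i ≠ n) (s : Int) (cs : List Char) :
    l.foldl (pvStepA n) (s, cs) =
      (s + l.sum, cs ++ (l.map (fun i => PySem.Int.toChars i ++ [' ', '+', ' '])).flatten) := by
  induction l generalizing s cs with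
  | nil => simp
  | cons a t ih =>
      have ha : a ≠ n := h a (List.mem_cons_self ..)
      simp only [List.foldl_cons, pvStepA, if_neg ha]
      rw [ih (fun i hi => h i (List.mem_cons_of_mem _ hi))]
      simp [List.sum_cons, add_assoc]

-- join with separator, last element split off.
lemma pvJoin_snoc (sep x : List Char) (l : List (List Char)) :
    PySem.Chars.join sep (l ++ [x]) = (l.map (fun c => c ++ sep)).flatten ++ x := by
  induction l with
  | nil => simp [PySem.Chars.join_singleton]
  | cons a t ih =>
      rcases t with _ | ⟨b, t'⟩
      · simp [PySem.Chars.join_cons_cons, PySem.Chars.join_singleton]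
      · simp only [List.cons_append]
        rw [PySem.Chars.join_cons_cons]
        rw [List.cons_append] at ih
        simp [ih]

-- sum of range(1, m+1) for m ≥ 0, Euclidean division (nonnegative operands).
lemma pvSum_range (k : Nat) :
    (PySem.List.pyRange 1 ((k : Int) + 1) 1).sum = (k : Int) * (k + 1) / 2 := by
  induction k with
  | zero => decide
  | succ m ih =>
      have h1 : (1 : Int) ≤ (m : Int) + 1 := by omega
      rw [show ((m.succ : Int) + 1) = ((m : Int) + 1) + 1 by push_cast; ring,
          PySem.List.pyRange_one_succ_right h1]
      rw [List.sum_append, List.sum_singleton, ih]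
      have : ((m : Int) + 1) * ((m : Int) + 1 + 1) = (m : Int) * ((m : Int) + 1) + 2 * ((m : Int) + 1) := by ring
      push_cast
      omega

-- ===== VERDICT (by name: the statement is the Claim_ definition above) =====
theorem calcular_suma_y_secuencia_spec : Claim_equal_calcular_suma_y_secuencia := by
  intro n _
  unfold Spec_calcular_suma_y_secuencia calcular_suma_y_secuencia calcular_suma_y_secuencia_alt
  by_cases hn : 0 < n
  · -- split range(1, n+1) = range(1, n) ++ [n]
    have hsplit : PySem.List.pyRange 1 (n + 1) 1 = PySem.List.pyRange 1 n 1 ++ [n] :=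
      PySem.List.pyRange_one_succ_right (by omega)
    have hne : ∀ i ∈ PySem.List.pyRange 1 n 1, i ≠ n := by
      intro i hi
      have := (PySem.List.mem_pyRange_one.mp hi).2
      omega
    -- A side
    have hA : (PySem.List.pyRange 1 (n + 1) 1).foldl (pvStepA n) (0, ([] : List Char)) =
        ((PySem.List.pyRange 1 n 1).sum + n,
         ((PySem.List.pyRange 1 n 1).map (fun i => PySem.Int.toChars i ++ [' ', '+', ' '])).flatten
           ++ PySem.Int.toChars n) := by
      rw [hsplit, List.foldl_append, pvFoldA_ne n _ hne 0 []]
      simp [pvStepA]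
    -- B's string side
    have hB : PySem.Chars.join [' ', '+', ' ']
        ((PySem.List.pyRange 1 (n + 1) 1).map PySem.Int.toChars) =
        ((PySem.List.pyRange 1 n 1).map (fun i => PySem.Int.toChars i ++ [' ', '+', ' '])).flatten
          ++ PySem.Int.toChars n := by
      rw [hsplit, List.map_append, List.map_singleton, pvJoin_snoc]
      simp [Function.comp_def]
    -- sum side
    obtain ⟨k, hk⟩ : ∃ k : Nat, n = (k : Int) := ⟨n.toNat, by omega⟩
    have hsum : (PySem.List.pyRange 1 n 1).sum + n = n * (n + 1) / 2 := by
      subst hk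
      have := pvSum_range k
      rw [PySem.List.pyRange_one_succ_right (show (1:Int) ≤ (k:Int) by omega)] at this
      simpa [List.sum_append] using this
    have hfd : PySem.Int.floordiv (n * (n + 1)) 2 = n * (n + 1) / 2 := by
      rw [show PySem.Int.floordiv (n*(n+1)) 2 = (n*(n+1)).fdiv 2 from rfl, Int.fdiv_eq_ediv]
      norm_num
    show ((( PySem.List.pyRange 1 (n + 1) 1).foldl (fun st i => pvStepA n st i) (0, ([] : List Char))).1,
          String.ofList ((PySem.List.pyRange 1 (n + 1) 1).foldl (fun st i => pvStepA n st i) (0, ([] : List Char))).2) = _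
    rw [show (fun (st : Int × List Char) i => pvStepA n st i) = pvStepA n from rfl, hA]
    simp only [hB, if_pos hn, hfd, hsum]
  · -- n ≤ 0: empty range on both sides
    have hnil : PySem.List.pyRange 1 (n + 1) 1 = [] :=
      PySem.List.pyRange_one_eq_nil (by omega)
    simp [hnil, PySem.Chars.join, List.intercalate, if_neg hn]
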